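-- pv_equiv track=rewrite | github.com/mlockett42/lettuce | lettuce/strings.py | parse_multiline
-- ===== SOURCE A (Python) =====
-- def parse_multiline(lines):
--     multilines = []
--     in_multiline = False
--     for line in lines:
--         if line == '"""':
--             in_multiline = not in_multiline
--         elif in_multiline:
--             if line.startswith('"'):
--                 line = line[1:]
--             if line.endswith('"'):
--                 line = line[:-1]
--             multilines.append(line)
--     return u'\n'.join(multilines)
-- ===== SOURCE B (Python) =====
-- def _strip_quotes(line):
--     if line.startswith('"'):
--         line = line[1:]
--     if line.endswith('"'):
--         line = line[:-1]
--     return line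
--
--
-- def parse_multiline(lines):
--     # split the lines into segments separated by the '"""' marker lines
--     segs = []
--     cur = []
--     for line in lines:
--         if line == '"""':
--             segs.append(cur)
--             cur = []
--         else:
--             cur.append(line)
--     segs.append(cur)
--     # keep the odd-numbered segments (text between an opening marker and its
--     # closing marker, or after an unterminated final marker), stripping one
--     # quote at each end of every kept line
--     out = []
--     while len(segs) >= 2:
--         out.extend(_strip_quotes(l) for l in segs[1])
--         segs = segs[2:]
--     return '\n'.join(out)
-- ===== Notes on version B (the rewrite author's own statement) =====
-- stated objective: alternative
-- what changed: Replaces A's toggling in_multiline boolean with a two-phase decomposition: split the lines into segments at the '"""' marker lines, then collect the odd-numbered segments (stripping one quote at each end of every kept line) and join them.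
import Mathlib
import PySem

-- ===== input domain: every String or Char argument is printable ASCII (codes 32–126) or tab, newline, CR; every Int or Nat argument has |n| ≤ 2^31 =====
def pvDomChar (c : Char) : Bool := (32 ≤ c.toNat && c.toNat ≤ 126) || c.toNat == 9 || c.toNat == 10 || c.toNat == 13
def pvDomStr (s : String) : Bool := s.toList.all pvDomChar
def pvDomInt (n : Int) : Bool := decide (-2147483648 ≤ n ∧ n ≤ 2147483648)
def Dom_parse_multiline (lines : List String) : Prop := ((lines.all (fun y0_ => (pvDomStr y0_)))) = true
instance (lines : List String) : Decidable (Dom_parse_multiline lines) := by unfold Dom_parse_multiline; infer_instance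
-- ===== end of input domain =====

-- B replaces A's toggling in_multiline flag by splitting the lines into segments at the
-- '"""' marker lines and keeping the odd-numbered segments (different decomposition).

-- ===== PORT A =====
-- loop body of A's for-loop over lines; state = (multilines, in_multiline)
def pvStepA (st : List String × Bool) (line : String) : List String × Bool :=
  if line == "\"\"\"" then (st.1, !st.2)
  else if st.2 then
    let line1 := if PySem.Str.startswith line "\"" then PySem.Str.slice line (some 1) none else line
    let line2 := if PySem.Str.endswith line1 "\"" then PySem.Str.slice line1 none (some (-1)) else line1
    (st.1 ++ [line2], st.2)
  else st

def parse_multiline (lines : List String) : String :=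
  let st := lines.foldl pvStepA ([], false)
  PySem.Str.join "\n" st.1

-- ===== PORT B =====
-- _strip_quotes from Source B
def pvStripQuotes (line : String) : String :=
  let line1 := if PySem.Str.startswith line "\"" then PySem.Str.slice line (some 1) none else line
  let line2 := if PySem.Str.endswith line1 "\"" then PySem.Str.slice line1 none (some (-1)) else line1
  line2

-- Source B's first loop: split into segments at marker lines; state = (segs, cur)
def pvStepB (st : List (List String) × List String) (line : String) : List (List String) × List String :=
  if line == "\"\"\"" then (st.1 ++ [st.2], []) else (st.1, st.2 ++ [line])

-- Source B's while-loop: take segs[1], strip each line, drop two segments, repeat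
def pvCollectOdd : List (List String) → List String
  | _ :: b :: rest => b.map pvStripQuotes ++ pvCollectOdd rest
  | _ => []

def parse_multiline_alt (lines : List String) : String :=
  let p := lines.foldl pvStepB ([], [])
  PySem.Str.join "\n" (pvCollectOdd (p.1 ++ [p.2]))

-- ===== PRECONDITION & SPEC =====
def Spec_parse_multiline (lines : List String) (out : String) : Prop := out = parse_multiline_alt lines
instance (lines : List String) (out : String) : Decidable (Spec_parse_multiline lines out) := by unfold Spec_parse_multiline; infer_instance

-- ===== CLAIM (what is proved, stated in full; the proofs are below) =====
def Claim_equal_parse_multiline : Prop := ∀ (lines : List String), Dom_parse_multiline lines → Spec_parse_multiline lines (parse_multiline lines)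

-- ===== LEMMAS AND PROOFS =====

lemma collectOdd_append_single : ∀ (xs : List (List String)) (c : List String),
    pvCollectOdd (xs ++ [c])
      = pvCollectOdd xs ++ (if xs.length % 2 = 1 then c.map pvStripQuotes else [])
  | [], c => by simp [pvCollectOdd]
  | [a], c => by simp [pvCollectOdd]
  | a :: b :: rest, c => by
      have ih := collectOdd_append_single rest c
      have hmod : (rest.length + 1 + 1) % 2 = rest.length % 2 := by omega
      simp [pvCollectOdd, ih, hmod]

lemma fold_invariant : ∀ (lines : List String) (segs : List (List String)) (cur : List String),
    (lines.foldl pvStepA (pvCollectOdd (segs ++ [cur]), decide (segs.length % 2 = 1))).1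
      = pvCollectOdd ((lines.foldl pvStepB (segs, cur)).1 ++ [(lines.foldl pvStepB (segs, cur)).2])
  | [], segs, cur => by simp
  | line :: rest, segs, cur => by
      simp only [List.foldl_cons]
      by_cases h : line = "\"\"\""
      · subst h
        have h1 : pvStepA (pvCollectOdd (segs ++ [cur]), decide (segs.length % 2 = 1)) "\"\"\""
            = (pvCollectOdd ((segs ++ [cur]) ++ [[]]), decide ((segs ++ [cur]).length % 2 = 1)) := by
          simp only [pvStepA]
          refine (if_pos (by simp)).trans ?_
          simp only [Prod.mk.injEq]
          constructor
          · rw [collectOdd_append_single (segs ++ [cur]) []]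
            simp
          · simp only [List.length_append, List.length_cons, List.length_nil]
            rcases Nat.mod_two_eq_zero_or_one segs.length with hp | hp <;>
              simp [hp, Nat.add_mod]
        have h2 : pvStepB (segs, cur) "\"\"\"" = (segs ++ [cur], []) := by simp [pvStepB]
        rw [h1, h2]
        exact fold_invariant rest (segs ++ [cur]) []
      · have h2 : pvStepB (segs, cur) line = (segs, cur ++ [line]) := by simp [pvStepB, h]
        have h1 : pvStepA (pvCollectOdd (segs ++ [cur]), decide (segs.length % 2 = 1)) line
            = (pvCollectOdd (segs ++ [cur ++ [line]]), decide (segs.length % 2 = 1)) := by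
          rcases Nat.mod_two_eq_zero_or_one segs.length with hp | hp
          ·            simp [pvStepA, h, collectOdd_append_single, hp]
          ·            simp [pvStepA, h, collectOdd_append_single, hp, pvStripQuotes]
        rw [h1, h2]
        exact fold_invariant rest segs (cur ++ [line])

-- ===== VERDICT (by name: the statement is the Claim_ definition above) =====
theorem parse_multiline_spec : Claim_equal_parse_multiline := by
  intro lines _
  unfold Spec_parse_multiline parse_multiline parse_multiline_alt
  have h := fold_invariant lines [] []
  simpa [pvCollectOdd] using congrArg (PySem.Str.join "\n") h
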